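-- pv_equiv track=rewrite | github.com/TiTaTovenaar2004/QuantumSearch | src/quantumsearch/core/utils.py | distribute_with_cap
-- ===== SOURCE A (Python) =====
-- def distribute_with_cap(k, n, dim_per_site):
--     if n == 1:
--         # Only one site left: valid only if within capacity
--         if k <= dim_per_site - 1:
--             yield (k,)
--     else:
--         # Limit each site to at most dim_per_site - 1 particles
--         for i in range(min(k, dim_per_site - 1) + 1):
--             for rest in distribute_with_cap(k - i, n - 1, dim_per_site):
--                 yield (i,) + rest
-- ===== SOURCE B (Python) =====
-- def distribute_with_cap(k, n, dim_per_site):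
--     # breadth-first: grow all valid prefixes level by level, then close with the last site
--     if n < 1:
--         return
--     cap = dim_per_site - 1
--     level = [((), k)]  # (prefix, remaining sum); lexicographic within each level
--     for _ in range(n - 1):
--         if not level:
--             break
--         level = [(prefix + (i,), rem - i)
--                  for prefix, rem in level
--                  for i in range(min(rem, cap) + 1)]
--     for prefix, rem in level:
--         if rem <= cap:
--             yield prefix + (rem,)
-- ===== Notes on version B (the rewrite author's own statement) =====
-- stated objective: alternative
-- what changed: Replaces A's recursive depth-first generator (one recursive call per remaining site) by an iterative breadth-first expansion: a list of (prefix, remaining-sum) pairs is grown level by level with a comprehension and the last site is closed in a final pass, yielding the same tuples in the same lexicographic order.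
import Mathlib
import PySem

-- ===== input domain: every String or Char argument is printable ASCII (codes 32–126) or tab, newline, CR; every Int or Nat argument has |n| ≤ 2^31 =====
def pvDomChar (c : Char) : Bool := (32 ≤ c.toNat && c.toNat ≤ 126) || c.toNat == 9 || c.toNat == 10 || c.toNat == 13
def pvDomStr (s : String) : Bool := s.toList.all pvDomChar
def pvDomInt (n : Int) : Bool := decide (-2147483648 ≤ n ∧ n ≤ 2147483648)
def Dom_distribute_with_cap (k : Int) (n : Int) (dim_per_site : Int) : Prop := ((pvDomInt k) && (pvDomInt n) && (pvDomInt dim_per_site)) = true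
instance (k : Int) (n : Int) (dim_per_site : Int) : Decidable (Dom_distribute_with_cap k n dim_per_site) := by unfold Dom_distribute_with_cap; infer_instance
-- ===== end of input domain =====

-- B replaces A's recursive depth-first generator by an iterative breadth-first expansion of
-- prefix levels (same pruning, same lexicographic order); equivalence of the return value is
-- proved on Pre_.


-- ===== PORT A =====
-- A's recursion decreases n by 1 with base n == 1, so on the inputs where A returns the
-- recursion is exactly n.toNat levels deep; fuel = n.toNat realises that recursion.
def distribute_with_cap_go (fuel : Nat) (k : Int) (dim_per_site : Int) : List (List Int) :=
  match fuel with
  | 0 => []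
  | 1 => if k ≤ dim_per_site - 1 then [[k]] else []
  | m + 2 =>
      (PySem.List.pyRange 0 (min k (dim_per_site - 1) + 1) 1).flatMap
        (fun i => (distribute_with_cap_go (m + 1) (k - i) dim_per_site).map (fun rest => i :: rest))

def distribute_with_cap (k : Int) (n : Int) (dim_per_site : Int) : List (List Int) :=
  distribute_with_cap_go n.toNat k dim_per_site

-- ===== PORT B =====
-- one level step of Source B's comprehension: extend every (prefix, rem) by each admissible i
def distribute_with_cap_ext (dim_per_site : Int) (level : List (List Int × Int)) : List (List Int × Int) :=
  level.flatMap (fun pr =>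
    (PySem.List.pyRange 0 (min pr.2 (dim_per_site - 1) + 1) 1).map
      (fun i => (pr.1 ++ [i], pr.2 - i)))

-- Source B's 'for _ in range(n-1)' loop with its 'if not level: break' early exit
def distribute_with_cap_bfs (dim_per_site : Int) : Nat → List (List Int × Int) → List (List Int × Int)
  | 0, level => level
  | t + 1, level =>
      if level.isEmpty then level
      else distribute_with_cap_bfs dim_per_site t (distribute_with_cap_ext dim_per_site level)

def distribute_with_cap_alt (k : Int) (n : Int) (dim_per_site : Int) : List (List Int) :=
  if n < 1 then []
  else
    (distribute_with_cap_bfs dim_per_site (n - 1).toNat [(([] : List Int), k)]).filterMap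
      (fun pr => if pr.2 ≤ dim_per_site - 1 then some (pr.1 ++ [pr.2]) else none)

-- ===== PRECONDITION & SPEC =====
-- Pre_ excludes exactly the inputs on which A raises RecursionError: when k ≥ 0 and
-- dim_per_site ≥ 1 the per-site range is nonempty at every level, so for n ≤ 0 A recurses
-- without ever reaching its base case, and for n ≥ 998 A's n-deep generator recursion
-- exceeds CPython's recursion limit (measured: A returns for n ≤ 997, raises for n ≥ 998).
-- On every excluded input A raises; when k < 0 or dim_per_site ≤ 0 the first range is
-- empty and A returns [] for any n, so those inputs stay inside Pre_.
def Pre_distribute_with_cap (k : Int) (n : Int) (dim_per_site : Int) : Prop :=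
  (1 ≤ n ∧ n ≤ 997) ∨ k < 0 ∨ dim_per_site ≤ 0
instance (k : Int) (n : Int) (dim_per_site : Int) : Decidable (Pre_distribute_with_cap k n dim_per_site) := by unfold Pre_distribute_with_cap; infer_instance
def pvWitness_distribute_with_cap : Int × Int × Int := (2, 2, 3)

def Spec_distribute_with_cap (k : Int) (n : Int) (dim_per_site : Int) (out : List (List Int)) : Prop := out = distribute_with_cap_alt k n dim_per_site
instance (k : Int) (n : Int) (dim_per_site : Int) (out : List (List Int)) : Decidable (Spec_distribute_with_cap k n dim_per_site out) := by unfold Spec_distribute_with_cap; infer_instance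

-- ===== CLAIM (what is proved, stated in full; the proofs are below) =====
def Claim_equal_distribute_with_cap : Prop := ∀ (k : Int) (n : Int) (dim_per_site : Int), Dom_distribute_with_cap k n dim_per_site → Pre_distribute_with_cap k n dim_per_site → Spec_distribute_with_cap k n dim_per_site (distribute_with_cap k n dim_per_site)

-- ===== LEMMAS AND PROOFS =====

-- closing a level after m further expansions = running A's recursion with fuel m+1 under
-- each pending prefix
theorem bfs_go (dim : Int) (m : Nat) :
    ∀ L : List (List Int × Int),
      (distribute_with_cap_bfs dim m L).filterMap
          (fun pr => if pr.2 ≤ dim - 1 then some (pr.1 ++ [pr.2]) else none)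
        = L.flatMap (fun pr => (distribute_with_cap_go (m + 1) pr.2 dim).map (fun c => pr.1 ++ c)) := by
  induction m with
  | zero =>
      intro L
      show L.filterMap _ = _
      rw [List.filterMap_eq_flatMap_toList]
      apply List.flatMap_congr
      intro pr _
      simp only [distribute_with_cap_go]
      by_cases h : pr.2 ≤ dim - 1
      · simp [h]
      · simp [h]
  | succ m ih =>
      intro L
      show (if L.isEmpty then L else distribute_with_cap_bfs dim m (distribute_with_cap_ext dim L)).filterMap _ = _
      by_cases hL : L.isEmpty
      · rw [if_pos hL]
        rw [List.isEmpty_iff] at hL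
        subst hL
        rfl
      · rw [if_neg hL, ih (distribute_with_cap_ext dim L)]
        unfold distribute_with_cap_ext
        rw [List.flatMap_assoc]
        apply List.flatMap_congr
        intro pr _
        rw [List.flatMap_map]
        show _ = (distribute_with_cap_go (m + 2) pr.2 dim).map (fun c => pr.1 ++ c)
        simp only [distribute_with_cap_go]
        rw [List.map_flatMap]
        apply List.flatMap_congr
        intro i _
        simp only [List.map_map]
        apply List.map_congr_left
        intro c _
        simp

-- B computes exactly A's recursion with fuel n.toNat (for n ≥ 1)
theorem alt_eq_go (k n dim : Int) (hn : 1 ≤ n) :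
    distribute_with_cap_alt k n dim = distribute_with_cap_go n.toNat k dim := by
  unfold distribute_with_cap_alt
  rw [if_neg (by omega)]
  rw [bfs_go dim (n - 1).toNat [(([] : List Int), k)]]
  have h1 : (n - 1).toNat + 1 = n.toNat := by omega
  rw [h1]
  simp

-- ===== VERDICT (by name: the statement is the Claim_ definition above) =====
theorem distribute_with_cap_spec : Claim_equal_distribute_with_cap := by
  intro k n dim _ _
  unfold Spec_distribute_with_cap
  by_cases hn : 1 ≤ n
  · rw [alt_eq_go k n dim hn]
    rfl
  · -- n ≤ 0: A's port runs with fuel 0 and B returns [] at its n < 1 guard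
    unfold distribute_with_cap distribute_with_cap_alt
    rw [if_pos (by omega)]
    have h0 : n.toNat = 0 := by omega
    rw [h0]
    rfl
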